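-- pv_equiv track=rewrite | github.com/CJEROM/bible-insight-server | services/ingestor/chapter.py | parse_ldml_punctuation
-- ===== SOURCE A (Python) =====
-- def parse_ldml_punctuation(exemplar_text):
--     if not exemplar_text.strip():
--         return []
--
--     # Remove outer brackets
--     content = exemplar_text.strip()[1:-1]  # Remove [ and ]
--
--     punctuation_chars = []
--     i = 0
--
--     while i < len(content):
--         char = content[i]
--
--         if char == '\\' and i + 1 < len(content):
--             # Handle escaped characters
--             next_char = content[i + 1]
--             if next_char == 'u' and i + 5 < len(content):
--                 # Unicode escape sequence like \u2019
--                 unicode_hex = content[i + 2:i + 6]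
--                 try:
--                     unicode_char = chr(int(unicode_hex, 16))
--                     punctuation_chars.append(unicode_char)
--                     i += 6
--                 except ValueError:
--                     punctuation_chars.append(next_char)
--                     i += 2
--             else:
--                 # Regular escape like \: or \-
--                 punctuation_chars.append(next_char)
--                 i += 2
--         elif char == '{' and '}' in content[i:]:
--             # Handle multi-character sequences like {...}
--             end_brace = content.find('}', i)
--             sequence = content[i + 1:end_brace]
--             punctuation_chars.append(sequence) # e.g. "..."
--             i = end_brace + 1
--         elif char not in [' ', '\t', '\n']:
--             # Regular character
--             punctuation_chars.append(char)
--             i += 1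
--         else:
--             i += 1
--
--     return punctuation_chars
-- ===== SOURCE B (Python) =====
-- def parse_ldml_punctuation(exemplar_text):
--     stripped = exemplar_text.strip()
--     if not stripped:
--         return []
--
--     # Consume the bracket-stripped content as a stack (reversed list, O(1) pops),
--     # maintaining a live count of '}' still on the stack instead of rescanning
--     # the remainder for each '{'.
--     stack = list(stripped[1:-1])
--     stack.reverse()
--     closers = stack.count('}')
--     out = []
--
--     while stack:
--         c = stack.pop()
--         if c == '\\' and stack:
--             nxt = stack.pop()
--             if nxt == '}':
--                 closers -= 1
--             if nxt == 'u' and len(stack) >= 4: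
--                 hex4 = ''.join(stack[-4:][::-1])
--                 try:
--                     out.append(chr(int(hex4, 16)))
--                     closers -= hex4.count('}')
--                     del stack[-4:]
--                 except ValueError:
--                     out.append('u')
--             else:
--                 out.append(nxt)
--         elif c == '{' and closers > 0:
--             buf = []
--             while True:
--                 d = stack.pop()
--                 if d == '}':
--                     closers -= 1
--                     break
--                 buf.append(d)
--             out.append(''.join(buf))
--         else:
--             if c == '}':
--                 closers -= 1
--             if c not in (' ', '\t', '\n'):
--                 out.append(c)
--     return out
-- ===== Notes on version B (the rewrite author's own statement) =====
-- stated objective: alternative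
-- what changed: A walks an index over the content, re-scanning the remaining text for a closing brace at each opening brace and slicing by computed indices; B consumes the content as a stack (reversed list with O(1) pops, an inner pop-loop for brace groups) while maintaining a running count of the closing braces still unread, so no index arithmetic or rescans are needed. Pre_ excludes inputs containing a \uD800-\uDFFF escape pattern: the returned str there may hold a lone UTF-16 surrogate, which is not representable as a Lean String.
import Mathlib
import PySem

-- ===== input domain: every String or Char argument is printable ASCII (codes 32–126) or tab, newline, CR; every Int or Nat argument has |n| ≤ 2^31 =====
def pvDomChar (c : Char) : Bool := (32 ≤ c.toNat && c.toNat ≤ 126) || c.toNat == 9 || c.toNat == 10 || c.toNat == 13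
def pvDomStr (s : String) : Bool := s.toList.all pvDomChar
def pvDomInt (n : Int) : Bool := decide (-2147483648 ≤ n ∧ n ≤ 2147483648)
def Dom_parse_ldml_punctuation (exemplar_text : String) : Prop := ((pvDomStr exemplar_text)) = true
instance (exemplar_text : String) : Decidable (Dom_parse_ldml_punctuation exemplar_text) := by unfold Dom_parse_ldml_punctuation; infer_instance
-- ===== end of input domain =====

-- B replaces A's index-walking loop (with its rescans of the remaining text for a closing brace)
-- by a stack consumed from the front together with a maintained count of unread closing braces;
-- objective: alternative. Equivalence of the RETURN values is proved for inputs whose result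
-- contains no lone UTF-16 surrogate (see Pre_ below).

-- shared helper: chr(int(hex, 16)) inside try/except ValueError, as an Option
-- (exact for results outside the surrogate range U+D800–U+DFFF, which Pre_ excludes:
--  Python's chr accepts those, but a Lean Char/String cannot hold them)
def pvChr? (n : Int) : Option Char :=
  if 0 ≤ n ∧ n < 1114112 then some (Char.ofNat n.toNat) else none

def pvTryU (hex : List Char) : Option Char :=
  (PySem.Int.ofCharsBase? hex 16).bind pvChr?

-- ===== PORT A =====
-- the while loop over index i; fuel = content.length - i suffices since i grows each step
def pvALoop (content : List Char) (fuel i : Nat) : List String :=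
  match fuel with
  | 0 => []
  | fuel' + 1 =>
    match PySem.List.pyGet? content (i : Int) with
    | none => []  -- i ≥ len(content): loop ends
    | some char =>
      if char = '\\' ∧ i + 1 < content.length then
        match PySem.List.pyGet? content ((i : Int) + 1) with
        | none => []  -- unreachable: i + 1 < len
        | some next_char =>
          if next_char = 'u' ∧ i + 5 < content.length then
            match pvTryU (PySem.List.slice content (some ((i : Int) + 2)) (some ((i : Int) + 6))) with
            | some c => String.ofList [c] :: pvALoop content fuel' (i + 6)
            | none => "u" :: pvALoop content fuel' (i + 2)
          else String.ofList [next_char] :: pvALoop content fuel' (i + 2)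
      else if char = '{' ∧ PySem.Chars.isIn ['}'] (PySem.List.slice content (some (i : Int)) none) = true then
        -- end_brace = content.find('}', i): first '}' at an index ≥ i (exists by the guard)
        let end_brace := (PySem.Chars.findFrom content ['}'] (i : Int) none).toNat
        String.ofList (PySem.List.slice content (some ((i : Int) + 1)) (some (end_brace : Int)))
          :: pvALoop content fuel' (end_brace + 1)
      else if char ≠ ' ' ∧ char ≠ '\t' ∧ char ≠ '\n' then
        String.ofList [char] :: pvALoop content fuel' (i + 1)
      else pvALoop content fuel' (i + 1)

def parse_ldml_punctuation (exemplar_text : String) : List String :=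
  let stripped := (PySem.Str.strip exemplar_text).toList
  if stripped = [] then []
  else
    let content := PySem.List.slice stripped (some 1) (some (-1))
    pvALoop content content.length 0

-- ===== PORT B =====
-- Source B consumes `stack` (the reversed content) by popping from its end, which is exactly
-- consuming the un-reversed content from the front: the list argument here IS that remainder.
def pvBLoop : List Char → Nat → List String
  | [], _ => []
  | '\\' :: nxt :: rest2, closers =>
    let cl := if nxt = '}' then closers - 1 else closers
    if nxt = 'u' ∧ 4 ≤ rest2.length then
      match pvTryU (rest2.take 4) with
      | some c => String.ofList [c] :: pvBLoop (rest2.drop 4) (cl - (rest2.take 4).count '}')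
      | none => "u" :: pvBLoop rest2 cl
    else String.ofList [nxt] :: pvBLoop rest2 cl
  | c :: rest, closers =>
    if c = '{' ∧ 0 < closers then
      let buf := rest.takeWhile (· ≠ '}')
      String.ofList buf :: pvBLoop ((rest.dropWhile (· ≠ '}')).drop 1) (closers - 1)
    else
      let cl := if c = '}' then closers - 1 else closers
      if c ≠ ' ' ∧ c ≠ '\t' ∧ c ≠ '\n' then String.ofList [c] :: pvBLoop rest cl
      else pvBLoop rest cl
  termination_by l _ => l.length
  decreasing_by
    · simp; omega
    · simp
    · simp
    · simp
      have := List.length_dropWhile_le (p := fun x : Char => !decide (x = '}')) (l := rest)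
      omega
    · simp
    · simp

def parse_ldml_punctuation_alt (exemplar_text : String) : List String :=
  let stripped := (PySem.Str.strip exemplar_text).toList
  if stripped = [] then []
  else
    let content := PySem.List.slice stripped (some 1) (some (-1))
    pvBLoop content (content.count '}')

-- ===== PRECONDITION & SPEC =====
def pvHexDig (c : Char) : Bool :=
  ('0' ≤ c && c ≤ '9') || ('a' ≤ c && c ≤ 'f') || ('A' ≤ c && c ≤ 'F')
def pvHexVal (c : Char) : Nat :=
  if c ≤ '9' then c.toNat - 48 else if c ≤ 'F' then c.toNat - 55 else c.toNat - 87
def pvSurrEsc : List Char → Bool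
  | '\\' :: 'u' :: a :: b :: c :: d :: _ =>
    pvHexDig a && pvHexDig b && pvHexDig c && pvHexDig d &&
      (let v := ((pvHexVal a * 16 + pvHexVal b) * 16 + pvHexVal c) * 16 + pvHexVal d
       55296 ≤ v && v ≤ 57343)
  | _ => false
def pvHasSurrEsc : List Char → Bool
  | [] => false
  | c :: t => pvSurrEsc (c :: t) || pvHasSurrEsc t

-- Pre_ excludes inputs containing a \uD800–\uDFFF escape: on those A returns a Python str holding
-- a lone UTF-16 surrogate, which is not a value of the Lean type String (B returns the same str).
def Pre_parse_ldml_punctuation (exemplar_text : String) : Prop :=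
  pvHasSurrEsc exemplar_text.toList = false
instance (exemplar_text : String) : Decidable (Pre_parse_ldml_punctuation exemplar_text) := by
  unfold Pre_parse_ldml_punctuation; infer_instance

def pvWitness_parse_ldml_punctuation : String := "[a\\u2019{...}]"

def Spec_parse_ldml_punctuation (exemplar_text : String) (out : List String) : Prop := out = parse_ldml_punctuation_alt exemplar_text
instance (exemplar_text : String) (out : List String) : Decidable (Spec_parse_ldml_punctuation exemplar_text out) := by unfold Spec_parse_ldml_punctuation; infer_instance

-- ===== CLAIM (what is proved, stated in full; the proofs are below) =====
def Claim_equal_parse_ldml_punctuation : Prop := ∀ (exemplar_text : String), Dom_parse_ldml_punctuation exemplar_text → Pre_parse_ldml_punctuation exemplar_text → Spec_parse_ldml_punctuation exemplar_text (parse_ldml_punctuation exemplar_text)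

-- ===== LEMMAS AND PROOFS =====

theorem pv_drop_takeWhile_length (p : Char → Bool) (l : List Char) :
    l.drop (l.takeWhile p).length = l.dropWhile p := by
  induction l with
  | nil => rfl
  | cons c t ih => by_cases h : p c <;> simp [h, ih]

theorem pv_take_takeWhile_length (p : Char → Bool) (l : List Char) :
    l.take (l.takeWhile p).length = l.takeWhile p := by
  induction l with
  | nil => rfl
  | cons c t ih => by_cases h : p c <;> simp [h, ih]

-- count of '}' in the part strictly before the first '}' is zero
theorem pv_count_takeWhile (l : List Char) : (l.takeWhile (· ≠ '}')).count '}' = 0 := by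
  rw [List.count_eq_zero]
  intro hm
  have := List.mem_takeWhile_imp hm
  simp at this

theorem pv_dropWhile_ne_nil (l : List Char) (h : '}' ∈ l) :
    l.dropWhile (· ≠ '}') ≠ [] := by
  simp only [ne_eq, List.dropWhile_eq_nil_iff, not_forall]
  exact ⟨'}', h, by simp⟩

theorem pv_head_dropWhile (l : List Char) (h : '}' ∈ l) :
    l.dropWhile (· ≠ '}') = '}' :: (l.dropWhile (· ≠ '}')).tail := by
  have hne := pv_dropWhile_ne_nil l h
  cases hdw : l.dropWhile (· ≠ '}') with
  | nil => exact absurd hdw hne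
  | cons d t =>
    have hh := List.head?_dropWhile_not (p := fun x : Char => decide (x ≠ '}')) (l := l)
    rw [hdw] at hh
    simp at hh
    simp [hh]

-- l[t]? = '}' at t = length of the takeWhile prefix
theorem pv_getElem_takeWhile_length (l : List Char) (h : '}' ∈ l) :
    l[(l.takeWhile (· ≠ '}')).length]? = some '}' := by
  rw [← List.head?_drop, pv_drop_takeWhile_length, pv_head_dropWhile l h]
  rfl

-- s.find('}') points at the first '}' : it equals the takeWhile length when '}' occurs
theorem pv_find_single (l : List Char) (h : '}' ∈ l) :
    PySem.Chars.find l ['}'] = ((l.takeWhile (· ≠ '}')).length : Int) := by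
  have hinf : ['}'] <:+: l := (List.singleton_infix_iff _ _).mpr h
  have h0 : 0 ≤ PySem.Chars.find l ['}'] := (PySem.Chars.find_nonneg_iff l ['}']).mpr hinf
  obtain ⟨hpre, hmin⟩ := PySem.Chars.find_spec h0
  have hpre_of : ∀ n : Nat, l[n]? = some '}' → ['}'] <+: l.drop n := by
    intro n hn
    rw [← List.head?_drop] at hn
    obtain ⟨tl, htl⟩ := List.head?_eq_some_iff.mp hn
    exact ⟨tl, by rw [htl]; rfl⟩
  have hof_pre : ∀ n : Nat, ['}'] <+: l.drop n → l[n]? = some '}' := by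
    intro n ⟨tl, htl⟩
    rw [← List.head?_drop, ← htl]
    rfl
  have hgf : l[(PySem.Chars.find l ['}']).toNat]? = some '}' := hof_pre _ hpre
  have hgt := pv_getElem_takeWhile_length l h
  have hft : ¬ ((PySem.Chars.find l ['}']).toNat < (l.takeWhile (· ≠ '}')).length) := by
    intro hlt
    have : l[(PySem.Chars.find l ['}']).toNat]? = (l.takeWhile (· ≠ '}'))[(PySem.Chars.find l ['}']).toNat]? := by
      rw [← pv_take_takeWhile_length (fun x : Char => decide (x ≠ '}')) l, List.getElem?_take_of_lt hlt]
    rw [hgf] at this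
    have hmem : '}' ∈ l.takeWhile (· ≠ '}') := List.mem_of_getElem? this.symm
    have := List.mem_takeWhile_imp hmem
    simp at this
  have htf : ¬ ((l.takeWhile (· ≠ '}')).length < (PySem.Chars.find l ['}']).toNat) :=
    fun hlt => hmin _ hlt (hpre_of _ hgt)
  omega

-- the main loop invariant: A at index i equals B on the remainder with the remainder's '}'-count
theorem pv_loop_eq (content : List Char) (fuel i : Nat) (h : content.length ≤ fuel + i) :
    pvALoop content fuel i = pvBLoop (content.drop i) ((content.drop i).count '}') := by
  induction fuel generalizing i with
  | zero =>
    rw [List.drop_eq_nil_of_le (by omega)]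
    simp [pvALoop, pvBLoop]
  | succ fuel ih =>
    cases hd : content.drop i with
    | nil =>
      have hlen : content.length ≤ i := by
        have := List.drop_eq_nil_iff.mp hd
        omega
      have hg : PySem.List.pyGet? content (i : Int) = none := by
        simp
        omega
      rw [pvALoop]
      simp only [hg]
      rw [pvBLoop]
    | cons c rest =>
      have hlend : content.length - i = rest.length + 1 := by
        have := congrArg List.length hd
        simpa using this
      have hlen : content.length = i + 1 + rest.length := by omega
      have hci : content[i]? = some c := by rw [← List.head?_drop, hd]; rfl
      have hrest : content.drop (i+1) = rest := by
        rw [← List.tail_drop, hd]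
        rfl
      have hgi : PySem.List.pyGet? content (i : Int) = some c := by simp [hci]
      rw [pvALoop]
      simp only [hgi]
      by_cases hb1 : c = '\\' ∧ i + 1 < content.length
      · obtain ⟨hc, hl1⟩ := hb1
        subst hc
        cases rest with
        | nil => exact absurd hl1 (by simp at hlen; omega)
        | cons nxt rest2 =>
          have hn : content[i+1]? = some nxt := by rw [← List.head?_drop, hrest]; rfl
          have hrest2 : content.drop (i+2) = rest2 := by
            rw [show i+2 = (i+1)+1 by omega, ← List.tail_drop, hrest]
            rfl
          have hgn : PySem.List.pyGet? content ((i:Int)+1) = some nxt := by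
            rw [show ((i:Int)+1) = ((i+1 : Nat) : Int) from by push_cast; ring,
                PySem.List.pyGet?_natCast, hn]
          rw [if_pos ⟨rfl, hl1⟩]
          simp only [hgn]
          rw [pvBLoop.eq_2]
          have hl2 : rest2.length + (i + 2) = content.length := by
            simp at hlen
            omega
          by_cases hb2 : nxt = 'u' ∧ i + 5 < content.length
          · obtain ⟨hnu, hl5⟩ := hb2
            subst hnu
            have h4 : 4 ≤ rest2.length := by omega
            have hsl : PySem.List.slice content (some ((i:Int)+2)) (some ((i:Int)+6)) = rest2.take 4 := by
              rw [show ((i:Int)+2) = ((i+2 : Nat) : Int) from by push_cast; ring,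
                  show ((i:Int)+6) = ((i+6 : Nat) : Int) from by push_cast; ring,
                  PySem.List.slice_natCast, hrest2]
              congr 1
              omega
            rw [if_pos ⟨rfl, hl5⟩, if_pos ⟨rfl, h4⟩, hsl]
            have hc2 : rest2.count '}' = (rest2.take 4).count '}' + (rest2.drop 4).count '}' := by
              conv_lhs => rw [← List.take_append_drop 4 rest2]
              rw [List.count_append]
            cases hu : pvTryU (rest2.take 4) with
            | some ch =>
              simp only []
              congr 1
              have hr6 : content.drop (i+6) = rest2.drop 4 := by
                rw [show i+6 = (i+2)+4 by omega, ← List.drop_drop, hrest2]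
              rw [ih (i+6) (by omega), hr6]
              congr 1
              simp
              omega
            | none =>
              simp only []
              congr 1
              rw [ih (i+2) (by omega), hrest2]
              simp
          · have hnot : ¬ (nxt = 'u' ∧ 4 ≤ rest2.length) := by
              rintro ⟨h1, h2⟩
              exact hb2 ⟨h1, by omega⟩
            rw [if_neg (by rintro ⟨h1, h2⟩; exact hb2 ⟨h1, h2⟩), if_neg hnot]
            congr 1
            rw [ih (i+2) (by omega), hrest2]
            congr 1
            by_cases hnj : nxt = '}' <;> simp [hnj]
      · rw [if_neg hb1]
        have hpat : ∀ (nxt : Char) (rest2 : List Char), c = '\\' → rest = nxt :: rest2 → False := by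
          intro nxt rest2 hc hr
          apply hb1
          refine ⟨hc, ?_⟩
          rw [hr] at hlen
          simp at hlen
          omega
        rw [pvBLoop.eq_3 _ _ _ hpat]
        have hslf : PySem.List.slice content (some (i:Int)) none = c :: rest := by
          rw [PySem.List.slice_from_natCast, hd]
        by_cases hbr : c = '{' ∧ PySem.Chars.isIn ['}'] (PySem.List.slice content (some (i:Int)) none) = true
        · obtain ⟨hc, hin⟩ := hbr
          subst hc
          rw [hslf] at hin
          have hmem : '}' ∈ rest := by
            have h1 := (PySem.Chars.isIn_iff_infix _ _).mp hin
            have h2 := (List.singleton_infix_iff _ _).mp h1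
            simpa using h2
          have hcnt0 : 0 < ('{'::rest).count '}' := by
            simp
            exact hmem
          rw [if_pos ⟨rfl, by rw [hslf]; exact hin⟩, if_pos ⟨rfl, hcnt0⟩]
          have hfind : PySem.Chars.find (content.drop i) ['}'] = (((rest.takeWhile (· ≠ '}')).length + 1 : Nat) : Int) := by
            rw [pv_find_single (content.drop i) (by rw [hd]; simp [hmem]), hd]
            have hta : ('{'::rest).takeWhile (· ≠ '}') = '{' :: rest.takeWhile (· ≠ '}') := by
              rw [List.takeWhile_cons]
              simp
            rw [hta]
            simp
            try omega
          have hff : PySem.Chars.findFrom content ['}'] (i:Int) none = ((i + 1 + (rest.takeWhile (· ≠ '}')).length : Nat) : Int) := by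
            rw [PySem.Chars.findFrom_natCast content ['}'] i (by omega), hfind]
            rw [if_neg (by omega)]
            push_cast
            ring
          rw [hff]
          simp only [Int.toNat_natCast]
          have hsl1 : PySem.List.slice content (some ((i:Int)+1)) (some ((i + 1 + (rest.takeWhile (· ≠ '}')).length : Nat) : Int)) = rest.takeWhile (· ≠ '}') := by
            rw [show ((i:Int)+1) = ((i+1 : Nat) : Int) from by push_cast; ring,
                PySem.List.slice_natCast, hrest,
                show i + 1 + (rest.takeWhile (· ≠ '}')).length - (i+1) = (rest.takeWhile (· ≠ '}')).length by omega]
            exact pv_take_takeWhile_length _ rest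
          rw [hsl1]
          congr 1
          have hdc : content.drop (i + 1 + (rest.takeWhile (· ≠ '}')).length + 1) = (rest.dropWhile (· ≠ '}')).drop 1 := by
            rw [show i + 1 + (rest.takeWhile (· ≠ '}')).length + 1 = (i+1) + (1 + (rest.takeWhile (· ≠ '}')).length) by omega,
                ← List.drop_drop, hrest,
                show 1 + (rest.takeWhile (· ≠ '}')).length = (rest.takeWhile (· ≠ '}')).length + 1 by omega,
                ← List.drop_drop, pv_drop_takeWhile_length]
          rw [ih _ (by omega), hdc]
          congr 1
          have hsplit : rest.count '}' = ((rest.dropWhile (· ≠ '}')).drop 1).count '}' + 1 := by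
            conv_lhs => rw [← List.takeWhile_append_dropWhile (p := (· ≠ '}')) (l := rest)]
            rw [List.count_append, pv_count_takeWhile, pv_head_dropWhile rest hmem]
            simp
          have hcc : ('{'::rest).count '}' = rest.count '}' := by simp
          rw [hcc]
          omega
        · have hBneg : ¬ (c = '{' ∧ 0 < (c::rest).count '}') := by
            rintro ⟨hc, hpos⟩
            subst hc
            apply hbr
            refine ⟨rfl, ?_⟩
            rw [hslf]
            rw [PySem.Chars.isIn_iff_infix, List.singleton_infix_iff]
            simp at hpos
            simp [hpos]
          rw [if_neg hbr, if_neg hBneg]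
          have hrec : pvALoop content fuel (i+1) = pvBLoop rest ((c::rest).count '}' - (if c = '}' then 1 else 0)) := by
            rw [ih (i+1) (by omega), hrest]
            congr 1
            by_cases hcj : c = '}' <;> simp [hcj]
          by_cases hws : c ≠ ' ' ∧ c ≠ '\t' ∧ c ≠ '\n'
          · rw [if_pos hws, if_pos hws, hrec]
            by_cases hcj : c = '}' <;> simp [hcj]
          · rw [if_neg hws, if_neg hws, hrec]
            by_cases hcj : c = '}' <;> simp [hcj]

-- entry-level equality
theorem pv_entry_eq (s : String) : parse_ldml_punctuation s = parse_ldml_punctuation_alt s := by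
  unfold parse_ldml_punctuation parse_ldml_punctuation_alt
  simp only []
  split
  · rfl
  · exact pv_loop_eq _ _ 0 (by omega) |>.trans (by simp)

-- ===== VERDICT (by name: the statement is the Claim_ definition above) =====
theorem parse_ldml_punctuation_spec : Claim_equal_parse_ldml_punctuation := by
  intro s _ _
  exact pv_entry_eq s
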